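-- pv_equiv track=rewrite | github.com/Enyium/windows_toolkit_talon | insert/insert.py | _is_well_formed_utf16
-- ===== SOURCE A (Python) =====
-- def _is_well_formed_utf16(code_units):
--     had_high_surrogate = False
--     for code_unit in code_units:
--         is_low_surrogate = code_unit >= 0xDC00 and code_unit <= 0xDFFF
--         if (
--             (not had_high_surrogate and is_low_surrogate)
--             or (had_high_surrogate and not is_low_surrogate)
--         ):
--             return False
--
--         had_high_surrogate = code_unit >= 0xD800 and code_unit <= 0xDBFF
--
--     return not had_high_surrogate
-- ===== SOURCE B (Python) =====
-- def _is_well_formed_utf16(code_units):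
--     units = list(code_units)
--     n = len(units)
--     i = 0
--     while i < n:
--         u = units[i]
--         if 0xDC00 <= u <= 0xDFFF:
--             return False  # lone low surrogate
--         if 0xD800 <= u <= 0xDBFF:
--             if i + 1 >= n or not (0xDC00 <= units[i + 1] <= 0xDFFF):
--                 return False  # high surrogate not followed by a low one
--             i += 2
--         else:
--             i += 1
--     return True
-- ===== Notes on version B (the rewrite author's own statement) =====
-- stated objective: alternative
-- what changed: Replaces the flag-carrying state machine (remembering across iterations whether the previous unit was a high surrogate) with an explicit index/lookahead loop that pairs a high surrogate with the next unit directly and steps by 2.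
import Mathlib
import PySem

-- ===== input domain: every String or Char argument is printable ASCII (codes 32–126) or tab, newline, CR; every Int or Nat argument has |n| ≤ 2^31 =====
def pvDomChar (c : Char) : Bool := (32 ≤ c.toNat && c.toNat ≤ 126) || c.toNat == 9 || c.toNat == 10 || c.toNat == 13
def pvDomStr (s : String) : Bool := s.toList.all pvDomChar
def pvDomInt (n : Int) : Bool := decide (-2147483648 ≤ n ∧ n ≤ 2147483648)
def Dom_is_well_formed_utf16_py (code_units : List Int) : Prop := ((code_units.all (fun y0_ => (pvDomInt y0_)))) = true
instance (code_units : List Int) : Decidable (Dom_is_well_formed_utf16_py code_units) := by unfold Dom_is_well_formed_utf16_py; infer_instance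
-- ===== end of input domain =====

-- B replaces A's flag-carrying state machine with an explicit lookahead loop that pairs surrogates directly (alternative decomposition, same O(n) cost).


-- ===== PORT A =====
-- the for-loop with the one-bit state `had_high_surrogate`
def pvLoopA : Bool → List Int → Bool
  | had, [] => !had
  | had, u :: rest =>
    let isLow : Bool := decide (u ≥ 0xDC00 ∧ u ≤ 0xDFFF)
    if (!had && isLow) || (had && !isLow) then false
    else pvLoopA (decide (u ≥ 0xD800 ∧ u ≤ 0xDBFF)) rest

def is_well_formed_utf16_py (code_units : List Int) : Bool :=
  pvLoopA false code_units

-- ===== PORT B =====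
-- the index/lookahead while-loop of Source B: consume one unit, or a high+low pair at once
def is_well_formed_utf16_py_alt : List Int → Bool
  | [] => true
  | u :: rest =>
    if 0xDC00 ≤ u ∧ u ≤ 0xDFFF then false
    else if 0xD800 ≤ u ∧ u ≤ 0xDBFF then
      match rest with
      | [] => false
      | v :: rest' =>
        if 0xDC00 ≤ v ∧ v ≤ 0xDFFF then is_well_formed_utf16_py_alt rest' else false
    else is_well_formed_utf16_py_alt rest

-- ===== PRECONDITION & SPEC =====
def Spec_is_well_formed_utf16_py (code_units : List Int) (out : Bool) : Prop := out = is_well_formed_utf16_py_alt code_units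
instance (code_units : List Int) (out : Bool) : Decidable (Spec_is_well_formed_utf16_py code_units out) := by unfold Spec_is_well_formed_utf16_py; infer_instance

-- ===== CLAIM (what is proved, stated in full; the proofs are below) =====
def Claim_equal_is_well_formed_utf16_py : Prop := ∀ (code_units : List Int), Dom_is_well_formed_utf16_py code_units → Spec_is_well_formed_utf16_py code_units (is_well_formed_utf16_py code_units)

-- ===== LEMMAS AND PROOFS =====
theorem pvLoopA_eq_alt : ∀ (xs : List Int), pvLoopA false xs = is_well_formed_utf16_py_alt xs := by
  intro xs
  induction xs using is_well_formed_utf16_py_alt.induct with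
  | case1 => rfl
  | case2 u rest hu =>
    rw [is_well_formed_utf16_py_alt.eq_def]
    simp [pvLoopA, show (u ≥ 0xDC00 ∧ u ≤ 0xDFFF) by omega]
  | case3 u hul huh =>
    simp [pvLoopA, is_well_formed_utf16_py_alt,
          show ¬(u ≥ 0xDC00 ∧ u ≤ 0xDFFF) by omega,
          show (u ≥ 0xD800 ∧ u ≤ 0xDBFF) by omega]
  | case4 u hul huh v rest' hv ih =>
    simp [pvLoopA, is_well_formed_utf16_py_alt,
          show ¬(u ≥ 0xDC00 ∧ u ≤ 0xDFFF) by omega,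
          show (u ≥ 0xD800 ∧ u ≤ 0xDBFF) by omega,
          show (v ≥ 0xDC00 ∧ v ≤ 0xDFFF) by omega,
          show ¬(v ≥ 0xD800 ∧ v ≤ 0xDBFF) by omega, ih]
  | case5 u hul huh v rest' hv =>
    simp [pvLoopA, is_well_formed_utf16_py_alt,
          show ¬(u ≥ 0xDC00 ∧ u ≤ 0xDFFF) by omega,
          show (u ≥ 0xD800 ∧ u ≤ 0xDBFF) by omega,
          show ¬(v ≥ 0xDC00 ∧ v ≤ 0xDFFF) by omega]
  | case6 u rest hul huh ih =>
    rw [is_well_formed_utf16_py_alt.eq_def]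
    simp [pvLoopA, show ¬(u ≥ 0xDC00 ∧ u ≤ 0xDFFF) by omega,
          show ¬(u ≥ 0xD800 ∧ u ≤ 0xDBFF) by omega, ih]

-- ===== VERDICT (by name: the statement is the Claim_ definition above) =====
theorem is_well_formed_utf16_py_spec : Claim_equal_is_well_formed_utf16_py := by
  intro xs _
  unfold Spec_is_well_formed_utf16_py is_well_formed_utf16_py
  exact pvLoopA_eq_alt xs
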